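-- pv_equiv track=rewrite | github.com/hattum/ijwit | classes/cyclefold.py | scoreHC
-- ===== SOURCE A (Python) =====
-- def scoreHC(coordsmatch):
--     """
--     returns score of all bonds among the assigned coordinates of a single proteine
--     """
--     scoreH = 0
--     scoreC = 0
--     for i in range(len(coordsmatch)):
--         current = coordsmatch[i][1]
--         for j in range(i+2, len(coordsmatch)):
--             next = coordsmatch[j][1]
--             if current[0] == next[0] and (current[1] == next[1] - 1 or current[1] == next[1] +1) and coordsmatch[i][0] == "H" and coordsmatch[j][0] == "H":
--                 scoreH += -1
--             elif current[0] == next[0] and (current[1] == next[1] - 1 or current[1] == next[1] +1) and coordsmatch[i][0] == "H" and coordsmatch[j][0] == "C":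
--                 scoreH += -1
--             elif current[0] == next[0] and (current[1] == next[1] - 1 or current[1] == next[1] +1) and coordsmatch[i][0] == "C" and coordsmatch[j][0] == "C":
--                 scoreC += -5
--             elif current[0] == next[0] and (current[1] == next[1] - 1 or current[1] == next[1] +1) and coordsmatch[i][0] == "C" and coordsmatch[j][0] == "H":
--                 scoreC += -1
--             elif current[1] == next[1] and (current[0] == next[0] - 1 or current[0] == next[0] +1) and coordsmatch[i][0] == "H" and coordsmatch[j][0] == "H":
--                 scoreH += -1
--             elif current[1] == next[1] and (current[0] == next[0] - 1 or current[0] == next[0] +1) and coordsmatch[i][0] == "H" and coordsmatch[j][0] == "C":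
--                 scoreH += -1
--             elif current[1] == next[1] and (current[0] == next[0] - 1 or current[0] == next[0] +1) and coordsmatch[i][0] == "C" and coordsmatch[j][0] == "C":
--                 scoreC += -5
--             elif current[1] == next[1] and (current[0] == next[0] - 1 or current[0] == next[0] +1) and coordsmatch[i][0] == "C" and coordsmatch[j][0] == "H":
--                 scoreC += -1
--     return scoreH + scoreC
-- ===== SOURCE B (Python) =====
-- def _bond(a, b):
--     if a == "H" and (b == "H" or b == "C"):
--         return -1
--     if a == "C" and b == "C":
--         return -5
--     if a == "C" and b == "H":
--         return -1
--     return 0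
--
--
-- def scoreHC(coordsmatch):
--     """
--     Same score as A, but O(n): index all residues by coordinate once, then
--     for each residue look up only its 4 grid neighbours instead of scanning
--     every later residue.
--     """
--     pairs = [(coord, (j, label)) for j, (label, coord) in enumerate(coordsmatch)]
--     index = {}
--     for key, val in pairs:
--         index[key] = index.get(key, []) + [val]
--     total = 0
--     for i, (label, (x, y)) in enumerate(coordsmatch):
--         for nbr in ((x + 1, y), (x - 1, y), (x, y + 1), (x, y - 1)):
--             for j, label2 in index.get(nbr, []):
--                 if j >= i + 2:
--                     total += _bond(label, label2)
--     return total
-- ===== Notes on version B (the rewrite author's own statement) =====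
-- stated objective: faster
-- what changed: A compares every pair (i, j>=i+2) in a nested O(n^2) scan; B builds a dict from grid coordinate to the residues there in one pass and then, per residue, looks up only its 4 grid neighbours and scores partners with index gap >= 2.
import Mathlib
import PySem

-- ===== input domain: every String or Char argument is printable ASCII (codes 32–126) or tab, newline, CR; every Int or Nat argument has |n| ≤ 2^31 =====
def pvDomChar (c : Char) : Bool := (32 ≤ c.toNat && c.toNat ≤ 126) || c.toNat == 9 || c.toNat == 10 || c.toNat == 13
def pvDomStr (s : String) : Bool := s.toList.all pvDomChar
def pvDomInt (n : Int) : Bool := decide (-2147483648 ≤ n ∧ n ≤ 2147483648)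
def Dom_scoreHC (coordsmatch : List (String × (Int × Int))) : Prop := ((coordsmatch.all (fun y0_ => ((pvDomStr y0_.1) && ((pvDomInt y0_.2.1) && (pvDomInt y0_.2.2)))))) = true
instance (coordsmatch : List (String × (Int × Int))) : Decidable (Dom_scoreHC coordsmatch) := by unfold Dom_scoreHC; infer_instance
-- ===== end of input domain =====

-- B replaces A's all-pairs double loop by a coordinate-indexed dict: each residue only
-- looks up its 4 grid neighbours (same return value; neither version mutates its input).

-- ===== PORT A =====
def pvDflt : String × (Int × Int) := ("", (0, 0))

-- A's inner-loop body: `e` is coordsmatch[i] (so `current` = e.2), cm[j] is read via pyGetD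
-- (all indices produced by range(...) are in range, so pyGetD with a default is exact here)
def pvStepA (cm : List (String × (Int × Int))) (e : String × (Int × Int))
    (s : Int × Int) (j : Int) : Int × Int :=
  if e.2.1 = (PySem.List.pyGetD cm j pvDflt).2.1 ∧ (e.2.2 = (PySem.List.pyGetD cm j pvDflt).2.2 - 1 ∨ e.2.2 = (PySem.List.pyGetD cm j pvDflt).2.2 + 1) ∧ e.1 = "H" ∧ (PySem.List.pyGetD cm j pvDflt).1 = "H" then (s.1 + (-1), s.2)
  else if e.2.1 = (PySem.List.pyGetD cm j pvDflt).2.1 ∧ (e.2.2 = (PySem.List.pyGetD cm j pvDflt).2.2 - 1 ∨ e.2.2 = (PySem.List.pyGetD cm j pvDflt).2.2 + 1) ∧ e.1 = "H" ∧ (PySem.List.pyGetD cm j pvDflt).1 = "C" then (s.1 + (-1), s.2)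
  else if e.2.1 = (PySem.List.pyGetD cm j pvDflt).2.1 ∧ (e.2.2 = (PySem.List.pyGetD cm j pvDflt).2.2 - 1 ∨ e.2.2 = (PySem.List.pyGetD cm j pvDflt).2.2 + 1) ∧ e.1 = "C" ∧ (PySem.List.pyGetD cm j pvDflt).1 = "C" then (s.1, s.2 + (-5))
  else if e.2.1 = (PySem.List.pyGetD cm j pvDflt).2.1 ∧ (e.2.2 = (PySem.List.pyGetD cm j pvDflt).2.2 - 1 ∨ e.2.2 = (PySem.List.pyGetD cm j pvDflt).2.2 + 1) ∧ e.1 = "C" ∧ (PySem.List.pyGetD cm j pvDflt).1 = "H" then (s.1, s.2 + (-1))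
  else if e.2.2 = (PySem.List.pyGetD cm j pvDflt).2.2 ∧ (e.2.1 = (PySem.List.pyGetD cm j pvDflt).2.1 - 1 ∨ e.2.1 = (PySem.List.pyGetD cm j pvDflt).2.1 + 1) ∧ e.1 = "H" ∧ (PySem.List.pyGetD cm j pvDflt).1 = "H" then (s.1 + (-1), s.2)
  else if e.2.2 = (PySem.List.pyGetD cm j pvDflt).2.2 ∧ (e.2.1 = (PySem.List.pyGetD cm j pvDflt).2.1 - 1 ∨ e.2.1 = (PySem.List.pyGetD cm j pvDflt).2.1 + 1) ∧ e.1 = "H" ∧ (PySem.List.pyGetD cm j pvDflt).1 = "C" then (s.1 + (-1), s.2)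
  else if e.2.2 = (PySem.List.pyGetD cm j pvDflt).2.2 ∧ (e.2.1 = (PySem.List.pyGetD cm j pvDflt).2.1 - 1 ∨ e.2.1 = (PySem.List.pyGetD cm j pvDflt).2.1 + 1) ∧ e.1 = "C" ∧ (PySem.List.pyGetD cm j pvDflt).1 = "C" then (s.1, s.2 + (-5))
  else if e.2.2 = (PySem.List.pyGetD cm j pvDflt).2.2 ∧ (e.2.1 = (PySem.List.pyGetD cm j pvDflt).2.1 - 1 ∨ e.2.1 = (PySem.List.pyGetD cm j pvDflt).2.1 + 1) ∧ e.1 = "C" ∧ (PySem.List.pyGetD cm j pvDflt).1 = "H" then (s.1, s.2 + (-1))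
  else s

def scoreHC (coordsmatch : List (String × (Int × Int))) : Int :=
  let n : Int := PySem.List.len coordsmatch
  let st := (PySem.List.pyRange 0 n).foldl (fun (s : Int × Int) i =>
    (PySem.List.pyRange (i + 2) n).foldl
      (pvStepA coordsmatch (PySem.List.pyGetD coordsmatch i pvDflt)) s) ((0 : Int), (0 : Int))
  st.1 + st.2

-- ===== PORT B =====
def pvBond (a b : String) : Int :=
  if a = "H" ∧ (b = "H" ∨ b = "C") then -1
  else if a = "C" ∧ b = "C" then -5
  else if a = "C" ∧ b = "H" then -1
  else 0

def scoreHC_alt (coordsmatch : List (String × (Int × Int))) : Int :=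
  let pairs := (PySem.List.enumerate coordsmatch).map (fun p => (p.2.2, (p.1, p.2.1)))
  let index : PySem.Dict (Int × Int) (List (Int × String)) :=
    pairs.foldl (fun d p => d.modify p.1 [] (fun l => l ++ [p.2])) PySem.Dict.empty
  (PySem.List.enumerate coordsmatch).foldl (fun total p =>
    [(p.2.2.1 + 1, p.2.2.2), (p.2.2.1 - 1, p.2.2.2), (p.2.2.1, p.2.2.2 + 1), (p.2.2.1, p.2.2.2 - 1)].foldl
      (fun total nbr =>
        (index.getD nbr []).foldl (fun total q =>
          if q.1 ≥ p.1 + 2 then total + pvBond p.2.1 q.2 else total) total) total) 0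

-- ===== PRECONDITION & SPEC =====
def Spec_scoreHC (coordsmatch : List (String × (Int × Int))) (out : Int) : Prop := out = scoreHC_alt coordsmatch
instance (coordsmatch : List (String × (Int × Int))) (out : Int) : Decidable (Spec_scoreHC coordsmatch out) := by unfold Spec_scoreHC; infer_instance

-- ===== CLAIM (what is proved, stated in full; the proofs are below) =====
def Claim_equal_scoreHC : Prop := ∀ (coordsmatch : List (String × (Int × Int))), Dom_scoreHC coordsmatch → Spec_scoreHC coordsmatch (scoreHC coordsmatch)

-- ===== LEMMAS AND PROOFS =====

-- score A adds for the ordered pair of entries (e, f) at index gap ≥ 2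
def pvG (e f : String × (Int × Int)) : Int :=
  if (e.2.1 = f.2.1 ∧ (e.2.2 = f.2.2 - 1 ∨ e.2.2 = f.2.2 + 1)) ∨
     (e.2.2 = f.2.2 ∧ (e.2.1 = f.2.1 - 1 ∨ e.2.1 = f.2.1 + 1)) then pvBond e.1 f.1 else 0

-- A's inner sum for row i
def pvInnerA (cm : List (String × (Int × Int))) (n i : Int) : Int :=
  ((PySem.List.pyRange (i + 2) n).map
    (fun j => pvG (PySem.List.pyGetD cm i pvDflt) (PySem.List.pyGetD cm j pvDflt))).sum

set_option maxHeartbeats 2000000 in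
set_option maxRecDepth 8192 in
theorem pvStepA_sum (cm : List (String × (Int × Int))) (e : String × (Int × Int))
    (s : Int × Int) (j : Int) :
    (pvStepA cm e s j).1 + (pvStepA cm e s j).2 =
      s.1 + s.2 + pvG e (PySem.List.pyGetD cm j pvDflt) := by
  unfold pvStepA
  generalize PySem.List.pyGetD cm j pvDflt = f
  obtain ⟨a, x, y⟩ := e
  obtain ⟨b, u, v⟩ := f
  by_cases hx : x = u
  · by_cases hd : y = v - 1 ∨ y = v + 1
    · have hyv : ¬ y = v := by rcases hd with h | h <;> omega
      simp only [pvG, pvBond, hx, hd, hyv]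
      simp only [true_and, false_and, if_false, or_true, true_or, or_false, if_pos trivial]
      split_ifs <;> first | omega | tauto
    · have h1 : ¬ y = v - 1 := fun h => hd (Or.inl h)
      have h2 : ¬ y = v + 1 := fun h => hd (Or.inr h)
      subst hx
      have h3 : ¬ x = x - 1 := by omega
      have h4 : ¬ x = x + 1 := by omega
      simp [pvG, h1, h2, h3, h4]
  · by_cases hy : y = v
    · by_cases hd : x = u - 1 ∨ x = u + 1
      · have h1 : ¬ y = v - 1 := by omega
        have h2 : ¬ y = v + 1 := by omega
        simp only [pvG, pvBond, hy, hd, hx, h1, h2]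
        simp only [true_and, false_and, if_false, or_true, true_or, if_pos trivial]
        split_ifs <;> first | omega | tauto
      · have h3 : ¬ x = u - 1 := fun h => hd (Or.inl h)
        have h4 : ¬ x = u + 1 := fun h => hd (Or.inr h)
        simp [pvG, hx, h3, h4]
    · simp [pvG, hx, hy]

theorem pvFoldA_inner (cm : List (String × (Int × Int))) (e : String × (Int × Int))
    (L : List Int) (s : Int × Int) :
    (L.foldl (pvStepA cm e) s).1 + (L.foldl (pvStepA cm e) s).2 =
      s.1 + s.2 + (L.map (fun j => pvG e (PySem.List.pyGetD cm j pvDflt))).sum := by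
  induction L generalizing s with
  | nil => simp
  | cons j L ih => simp [ih, pvStepA_sum]; ring

theorem pvFoldA_outer (cm : List (String × (Int × Int))) (n : Int)
    (L : List Int) (s : Int × Int) :
    ((L.foldl (fun (s : Int × Int) i =>
        (PySem.List.pyRange (i + 2) n).foldl
          (pvStepA cm (PySem.List.pyGetD cm i pvDflt)) s) s).1 +
     (L.foldl (fun (s : Int × Int) i =>
        (PySem.List.pyRange (i + 2) n).foldl
          (pvStepA cm (PySem.List.pyGetD cm i pvDflt)) s) s).2) =
      s.1 + s.2 + (L.map (pvInnerA cm n)).sum := by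
  induction L generalizing s with
  | nil => simp
  | cons i L ih => simp [ih, pvFoldA_inner, pvInnerA]; ring

theorem pvA_char (cm : List (String × (Int × Int))) :
    scoreHC cm = ((PySem.List.pyRange 0 (PySem.List.len cm)).map
      (fun i => pvInnerA cm (PySem.List.len cm) i)).sum := by
  simp only [scoreHC]
  rw [pvFoldA_outer]
  simp

-- B-side: the dict lookup yields exactly the residues at coordinate c, in index order
def pvGroup (cm : List (String × (Int × Int))) (c : Int × Int) : List (Int × String) :=
  ((PySem.List.enumerate cm).filter (fun r => r.2.2 == c)).map (fun r => (r.1, r.2.1))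

def pvS (cm : List (String × (Int × Int))) (i : Int) (lab : String) (c : Int × Int) : Int :=
  ((pvGroup cm c).map (fun q => if q.1 ≥ i + 2 then pvBond lab q.2 else 0)).sum

def pvF (cm : List (String × (Int × Int))) (p : Int × (String × (Int × Int))) : Int :=
  pvS cm p.1 p.2.1 (p.2.2.1 + 1, p.2.2.2) + pvS cm p.1 p.2.1 (p.2.2.1 - 1, p.2.2.2) +
  pvS cm p.1 p.2.1 (p.2.2.1, p.2.2.2 + 1) + pvS cm p.1 p.2.1 (p.2.2.1, p.2.2.2 - 1)

theorem pvIndex_getD (cm : List (String × (Int × Int))) (c : Int × Int) :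
    ((((PySem.List.enumerate cm).map (fun p => (p.2.2, (p.1, p.2.1)))).foldl
        (fun d p => d.modify p.1 [] (fun l => l ++ [p.2])) PySem.Dict.empty).getD c []) =
      pvGroup cm c := by
  rw [PySem.Dict.getD_foldl_modify_append]
  simp only [PySem.Dict.getD_empty, List.nil_append, List.filter_map, List.map_map]
  rfl

theorem pvFoldIf (l : List (Int × String)) (t0 i : Int) (lab : String) :
    l.foldl (fun t q => if q.1 ≥ i + 2 then t + pvBond lab q.2 else t) t0 =
      t0 + (l.map (fun q => if q.1 ≥ i + 2 then pvBond lab q.2 else 0)).sum := by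
  rw [show (fun (t : Int) (q : Int × String) => if q.1 ≥ i + 2 then t + pvBond lab q.2 else t) =
      (fun t q => t + if q.1 ≥ i + 2 then pvBond lab q.2 else 0) from by
    funext t q; split_ifs <;> simp]
  exact PySem.List.foldl_add l _ t0

theorem pvB_char (cm : List (String × (Int × Int))) :
    scoreHC_alt cm = ((PySem.List.enumerate cm).map (pvF cm)).sum := by
  simp only [scoreHC_alt]
  simp only [pvIndex_getD]
  rw [PySem.List.foldl_congr_mem _ _
    (fun (total : Int) p => total + pvF cm p) 0
    (by
      intro acc p _
      simp only [List.foldl_cons, List.foldl_nil, pvFoldIf, pvF, pvS]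
      ring)]
  rw [PySem.List.foldl_add]
  simp

theorem pvSum_filter {α : Type} (l : List α) (p : α → Bool) (h : α → Int) :
    ((l.filter p).map h).sum = (l.map (fun x => if p x then h x else 0)).sum := by
  induction l with
  | nil => rfl
  | cons a l ih => by_cases hp : p a <;> simp [hp, ih]

theorem pvPointwise (p r : Int × (String × (Int × Int))) :
    (if r.2.2 = (p.2.2.1 + 1, p.2.2.2) then (if r.1 ≥ p.1 + 2 then pvBond p.2.1 r.2.1 else 0) else 0) +
    (if r.2.2 = (p.2.2.1 - 1, p.2.2.2) then (if r.1 ≥ p.1 + 2 then pvBond p.2.1 r.2.1 else 0) else 0) +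
    (if r.2.2 = (p.2.2.1, p.2.2.2 + 1) then (if r.1 ≥ p.1 + 2 then pvBond p.2.1 r.2.1 else 0) else 0) +
    (if r.2.2 = (p.2.2.1, p.2.2.2 - 1) then (if r.1 ≥ p.1 + 2 then pvBond p.2.1 r.2.1 else 0) else 0) =
    if r.1 ≥ p.1 + 2 then pvG p.2 r.2 else 0 := by
  obtain ⟨i, a, x, y⟩ := p
  obtain ⟨j, b, u, v⟩ := r
  simp only [pvG, Prod.mk.injEq]
  by_cases h1 : u = x + 1 ∧ v = y
  · have hg : (x = u ∧ (y = v - 1 ∨ y = v + 1)) ∨ (y = v ∧ (x = u - 1 ∨ x = u + 1)) := by omega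
    have h2 : ¬ (u = x - 1 ∧ v = y) := by omega
    have h3 : ¬ (u = x ∧ v = y + 1) := by omega
    have h4 : ¬ (u = x ∧ v = y - 1) := by omega
    simp [h1, h2, h3, h4, hg] <;> (intro h' ; exact absurd h' (by omega))
  · by_cases h2 : u = x - 1 ∧ v = y
    · have hg : (x = u ∧ (y = v - 1 ∨ y = v + 1)) ∨ (y = v ∧ (x = u - 1 ∨ x = u + 1)) := by omega
      have h3 : ¬ (u = x ∧ v = y + 1) := by omega
      have h4 : ¬ (u = x ∧ v = y - 1) := by omega
      simp [h1, h2, h3, h4, hg] <;> (intro h' ; exact absurd h' (by omega))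
    · by_cases h3 : u = x ∧ v = y + 1
      · have hg : (x = u ∧ (y = v - 1 ∨ y = v + 1)) ∨ (y = v ∧ (x = u - 1 ∨ x = u + 1)) := by omega
        have h4 : ¬ (u = x ∧ v = y - 1) := by omega
        simp [h1, h2, h3, h4, hg] <;> (intro h' ; exact absurd h' (by omega))
      · by_cases h4 : u = x ∧ v = y - 1
        · have hg : (x = u ∧ (y = v - 1 ∨ y = v + 1)) ∨ (y = v ∧ (x = u - 1 ∨ x = u + 1)) := by omega
          simp [h1, h2, h3, h4, hg] <;> (intro h' ; exact absurd h' (by omega))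
        · have hg : ¬ ((x = u ∧ (y = v - 1 ∨ y = v + 1)) ∨ (y = v ∧ (x = u - 1 ∨ x = u + 1))) := by omega
          simp [h1, h2, h3, h4, hg] <;> (intro h' ; exact absurd h' (by omega))

theorem pvF_eq_innerA (cm : List (String × (Int × Int))) (i : Int) (h0 : 0 ≤ i) :
    pvF cm (i, PySem.List.pyGetD cm i pvDflt) = pvInnerA cm (PySem.List.len cm) i := by
  set e := PySem.List.pyGetD cm i pvDflt with he
  have hstep : pvF cm (i, e) = ((PySem.List.enumerate cm).map
      (fun r => if r.1 ≥ i + 2 then pvG e r.2 else 0)).sum := by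
    simp only [pvF, pvS, pvGroup, List.map_map]
    rw [pvSum_filter, pvSum_filter, pvSum_filter, pvSum_filter,
      ← PySem.List.sum_map_add_int, ← PySem.List.sum_map_add_int, ← PySem.List.sum_map_add_int]
    apply congrArg
    apply List.map_congr_left
    intro r _
    have := pvPointwise (i, e) r
    simp only [Function.comp, beq_iff_eq] at *
    convert this using 2
  rw [hstep, PySem.List.enumerate_eq_map_pyRange cm pvDflt, List.map_map]
  unfold pvInnerA
  rw [← he]
  by_cases hn : i + 2 ≤ PySem.List.len cm
  · rw [PySem.List.pyRange_one_append 0 (i + 2) (PySem.List.len cm) (by omega) hn,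
      List.map_append, List.sum_append]
    have hz : ((PySem.List.pyRange 0 (i + 2)).map
        ((fun r => if r.1 ≥ i + 2 then pvG e r.2 else 0) ∘
          fun j => (j, PySem.List.pyGetD cm j pvDflt))).sum = 0 := by
      apply List.sum_eq_zero
      intro z hz
      obtain ⟨j, hj, rfl⟩ := List.mem_map.1 hz
      have := PySem.List.mem_pyRange_one.1 hj
      simp only [Function.comp]
      rw [if_neg (by omega)]
    rw [hz, zero_add]
    apply congrArg
    apply List.map_congr_left
    intro j hj
    have := PySem.List.mem_pyRange_one.1 hj
    simp only [Function.comp]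
    rw [if_pos (by omega)]
  · rw [PySem.List.pyRange_one_eq_nil (show PySem.List.len cm ≤ i + 2 by omega)]
    simp only [List.map_nil, List.sum_nil]
    apply List.sum_eq_zero
    intro z hz
    obtain ⟨j, hj, rfl⟩ := List.mem_map.1 hz
    have := PySem.List.mem_pyRange_one.1 hj
    simp only [Function.comp]
    rw [if_neg (by omega)]

-- ===== VERDICT (by name: the statement is the Claim_ definition above) =====
theorem scoreHC_spec : Claim_equal_scoreHC := by
  intro cm _
  unfold Spec_scoreHC
  rw [pvA_char, pvB_char]
  rw [PySem.List.enumerate_eq_map_pyRange cm pvDflt, List.map_map]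
  apply congrArg
  apply List.map_congr_left
  intro i hi
  have hmem := PySem.List.mem_pyRange_one.1 hi
  simp only [Function.comp]
  rw [pvF_eq_innerA cm i hmem.1]
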